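-- pv_equiv track=rewrite | github.com/debojoti-soumya/poke-winner | src/simple_test.py | search_by_category
-- ===== SOURCE A (Python) =====
-- def search_by_category(query, texts):
--     """Search by semantic categories"""
--     categories = {
--         'health': ['virus', 'cases', 'health', 'medical', 'disease'],
--         'climate': ['ice', 'shelf', 'climate', 'environment', 'collapse'],
--         'politics': ['beijing', 'invasion', 'taiwan', 'mobilises', 'tensions'],
--         'nature': ['park', 'bear', 'wildlife', 'nature', 'service'],
--         'money': ['wins', 'lottery', 'profits', 'earn', 'million', 'dollar'],
--         'positive': ['wins', 'good', 'success', 'happy', 'lucky']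
--     }
--
--     query_lower = query.lower()
--     matches = []
--
--     for i, text in enumerate(texts):
--         text_lower = text.lower()
--         for category, keywords in categories.items():
--             if any(keyword in text_lower for keyword in keywords):
--                 if any(keyword in query_lower for keyword in keywords):
--                     matches.append((i, text, category))
--
--     return matches
-- ===== SOURCE B (Python) =====
-- def search_by_category(query, texts):
--     """Search by semantic categories via a flat keyword->category index."""
--     categories = {
--         'health': ['virus', 'cases', 'health', 'medical', 'disease'],
--         'climate': ['ice', 'shelf', 'climate', 'environment', 'collapse'],
--         'politics': ['beijing', 'invasion', 'taiwan', 'mobilises', 'tensions'],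
--         'nature': ['park', 'bear', 'wildlife', 'nature', 'service'],
--         'money': ['wins', 'lottery', 'profits', 'earn', 'million', 'dollar'],
--         'positive': ['wins', 'good', 'success', 'happy', 'lucky']
--     }
--     query_lower = query.lower()
--     # categories whose keywords hit the query, computed once
--     qcats = [cat for cat, kws in categories.items()
--              if any(kw in query_lower for kw in kws)]
--     # flat keyword->category index, category-major (preserves dict order)
--     pairs = [(kw, cat) for cat, kws in categories.items() for kw in kws]
--     matches = []
--     for i, text in enumerate(texts):
--         text_lower = text.lower()
--         seen = []
--         for kw, cat in pairs:
--             if cat in qcats and cat not in seen and kw in text_lower: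
--                 seen.append(cat)
--                 matches.append((i, text, cat))
--     return matches
-- ===== Notes on version B (the rewrite author's own statement) =====
-- stated objective: faster
-- what changed: B replaces the per-text per-category nested any() scans by a single flat keyword->category index scanned once per text with a 'seen' dedup list, with the query-matching category list computed once before the text loop instead of being re-tested for every text.
import Mathlib
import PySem

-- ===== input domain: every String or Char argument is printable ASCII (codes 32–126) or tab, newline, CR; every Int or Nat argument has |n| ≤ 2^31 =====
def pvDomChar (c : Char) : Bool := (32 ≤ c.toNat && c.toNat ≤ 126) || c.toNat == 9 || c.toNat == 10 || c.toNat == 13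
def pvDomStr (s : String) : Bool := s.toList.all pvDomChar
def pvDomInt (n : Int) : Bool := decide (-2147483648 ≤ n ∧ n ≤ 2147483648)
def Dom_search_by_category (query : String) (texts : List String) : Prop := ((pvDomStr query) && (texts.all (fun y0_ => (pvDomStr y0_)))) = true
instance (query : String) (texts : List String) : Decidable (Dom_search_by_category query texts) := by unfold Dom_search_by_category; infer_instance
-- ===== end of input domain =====

-- B scans a flat keyword->category index once per text with a seen-dedup list and hoists the query test out of the text loop (measured faster in a timing run); same results.


-- the fixed 'categories' dict, shared verbatim by both Pythons (insertion order)
def pvCategories : List (String × List String) :=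
  [("health", ["virus", "cases", "health", "medical", "disease"]),
   ("climate", ["ice", "shelf", "climate", "environment", "collapse"]),
   ("politics", ["beijing", "invasion", "taiwan", "mobilises", "tensions"]),
   ("nature", ["park", "bear", "wildlife", "nature", "service"]),
   ("money", ["wins", "lottery", "profits", "earn", "million", "dollar"]),
   ("positive", ["wins", "good", "success", "happy", "lucky"])]

-- ===== PORT A =====
def search_by_category (query : String) (texts : List String) : List (Int × String × String) :=
  let query_lower := PySem.Str.lower query
  (PySem.List.enumerate texts 0).foldl
    (fun ms it =>
      let text_lower := PySem.Str.lower it.2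
      pvCategories.foldl
        (fun m ck =>
          if ck.2.any (fun keyword => PySem.Str.isIn keyword text_lower) then
            if ck.2.any (fun keyword => PySem.Str.isIn keyword query_lower) then
              m ++ [(it.1, it.2, ck.1)]
            else m
          else m)
        ms)
    []

-- ===== PORT B =====
def search_by_category_alt (query : String) (texts : List String) : List (Int × String × String) :=
  let query_lower := PySem.Str.lower query
  let qcats := (pvCategories.filter
      (fun ck => ck.2.any (fun kw => PySem.Str.isIn kw query_lower))).map Prod.fst
  let pairs := pvCategories.flatMap (fun ck => ck.2.map (fun kw => (kw, ck.1)))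
  (PySem.List.enumerate texts 0).foldl
    (fun ms it =>
      let text_lower := PySem.Str.lower it.2
      (pairs.foldl
        (fun st pr =>
          if qcats.contains pr.2 && !st.2.contains pr.2 && PySem.Str.isIn pr.1 text_lower then
            (st.1 ++ [(it.1, it.2, pr.2)], st.2 ++ [pr.2])
          else st)
        (ms, ([] : List String))).1)
    []

-- ===== PRECONDITION & SPEC =====
def Spec_search_by_category (query : String) (texts : List String) (out : List (Int × String × String)) : Prop := out = search_by_category_alt query texts
instance (query : String) (texts : List String) (out : List (Int × String × String)) : Decidable (Spec_search_by_category query texts out) := by unfold Spec_search_by_category; infer_instance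

-- ===== CLAIM (what is proved, stated in full; the proofs are below) =====
def Claim_equal_search_by_category : Prop := ∀ (query : String) (texts : List String), Dom_search_by_category query texts → Spec_search_by_category query texts (search_by_category query texts)

-- ===== LEMMAS AND PROOFS =====

/-- If the category is already in `seen`, the whole keyword block of that category is skipped. -/
theorem pvBlockSkip {R : Type} (qc : List String) (p : String → Bool) (f : String → R)
    (cat : String) (kws : List String) (st : List R × List String)
    (h : st.2.contains cat = true) :
    (kws.map (fun kw => (kw, cat))).foldl
      (fun st pr =>
        if qc.contains pr.2 && !st.2.contains pr.2 && p pr.1 then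
          (st.1 ++ [f pr.2], st.2 ++ [pr.2])
        else st) st = st := by
  induction kws with
  | nil => rfl
  | cons kw kws ih =>
    simp only [List.map_cons, List.foldl_cons]
    rw [if_neg (by rw [h]; simp)]
    exact ih

/-- Scanning one category's keyword block with the dedup guard equals the category-level
`any` test: append once iff the category is active and some keyword matches. -/
theorem pvBlock {R : Type} (qc : List String) (p : String → Bool) (f : String → R)
    (cat : String) (kws : List String) (st : List R × List String)
    (h : st.2.contains cat = false) :
    (kws.map (fun kw => (kw, cat))).foldl
      (fun st pr =>
        if qc.contains pr.2 && !st.2.contains pr.2 && p pr.1 then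
          (st.1 ++ [f pr.2], st.2 ++ [pr.2])
        else st) st
      = if qc.contains cat && kws.any p then (st.1 ++ [f cat], st.2 ++ [cat]) else st := by
  induction kws generalizing st with
  | nil => simp
  | cons kw kws ih =>
    simp only [List.map_cons, List.foldl_cons]
    cases hq : qc.contains cat with
    | true =>
      cases hp : p kw with
      | true =>
        rw [if_pos (by rw [h]; rfl), pvBlockSkip qc p f cat kws _ (by simp),
          if_pos (by simp [hp])]
      | false =>
        have hq' : cat ∈ qc := by simpa using hq
        rw [if_neg (by simp), ih st h]
        simp [hq', hp]
    | false =>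
      have hq' : cat ∉ qc := by simpa using hq
      rw [if_neg (by simp), ih st h]
      simp [hq']

/-- Scanning the flat keyword index over a category list with distinct names, starting from a
`seen` list containing none of those names, equals the per-category guarded fold. -/
theorem pvMain {R : Type} (qc : List String) (p : String → Bool) (f : String → R)
    (cs : List (String × List String)) (hnd : (cs.map Prod.fst).Nodup)
    (st : List R × List String) (h : ∀ ck ∈ cs, st.2.contains ck.1 = false) :
    ((cs.flatMap (fun ck => ck.2.map (fun kw => (kw, ck.1)))).foldl
      (fun st pr =>
        if qc.contains pr.2 && !st.2.contains pr.2 && p pr.1 then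
          (st.1 ++ [f pr.2], st.2 ++ [pr.2])
        else st) st).1
      = cs.foldl (fun m ck => if qc.contains ck.1 && ck.2.any p then m ++ [f ck.1] else m) st.1 := by
  induction cs generalizing st with
  | nil => rfl
  | cons ck cs ih =>
    simp only [List.flatMap_cons, List.foldl_append, List.foldl_cons]
    rw [pvBlock qc p f ck.1 ck.2 st (h ck (List.mem_cons_self ..))]
    simp only [List.map_cons, List.nodup_cons] at hnd
    by_cases hcond : (qc.contains ck.1 && ck.2.any p) = true
    · rw [if_pos hcond, if_pos hcond]
      exact ih hnd.2 (st.1 ++ [f ck.1], st.2 ++ [ck.1])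
        (fun ck' hm => by
          have hne : ck'.1 ≠ ck.1 := fun he => hnd.1 (he ▸ List.mem_map_of_mem hm)
          have h1 : ck'.1 ∉ st.2 := by simpa using h ck' (List.mem_cons_of_mem _ hm)
          simp [h1, hne])
    · rw [if_neg hcond, if_neg hcond]
      exact ih hnd.2 st (fun ck' hm => h ck' (List.mem_cons_of_mem _ hm))

/-- With distinct names, membership of a category's name in the filtered name list is the
filter predicate at that category. -/
theorem pvContainsFilter {α : Type} (l : List (String × α)) (qp : String × α → Bool)
    (hnd : (l.map Prod.fst).Nodup) (ck : String × α) (hm : ck ∈ l) :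
    ((l.filter qp).map Prod.fst).contains ck.1 = qp ck := by
  have hinj := List.inj_on_of_nodup_map hnd
  cases hqp : qp ck with
  | true =>
    have : ck.1 ∈ (l.filter qp).map Prod.fst :=
      List.mem_map_of_mem (List.mem_filter.mpr ⟨hm, hqp⟩)
    simpa using this
  | false =>
    rw [Bool.eq_false_iff]
    intro hc
    have : ck.1 ∈ (l.filter qp).map Prod.fst := by simpa using hc
    obtain ⟨ck', hck', he⟩ := List.mem_map.mp this
    obtain ⟨hck'l, hqp'⟩ := List.mem_filter.mp hck'
    rw [hinj hck'l hm he] at hqp'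
    rw [hqp'] at hqp
    exact Bool.true_eq_false.mp hqp

theorem pvCategories_names_nodup : (pvCategories.map Prod.fst).Nodup := by decide

/-- Per-text equality of A's category-loop body and B's flat-index scan body. -/
theorem pvPerText (ql : String) (it : Int × String) (ms : List (Int × String × String)) :
    pvCategories.foldl
      (fun m ck =>
        if ck.2.any (fun keyword => PySem.Str.isIn keyword (PySem.Str.lower it.2)) then
          if ck.2.any (fun keyword => PySem.Str.isIn keyword (PySem.Str.lower ql)) then
            m ++ [(it.1, it.2, ck.1)]
          else m
        else m) ms
    = ((pvCategories.flatMap (fun ck => ck.2.map (fun kw => (kw, ck.1)))).foldl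
        (fun st pr =>
          if ((pvCategories.filter
                (fun ck => ck.2.any (fun kw => PySem.Str.isIn kw (PySem.Str.lower ql)))).map
                Prod.fst).contains pr.2 && !st.2.contains pr.2 &&
              PySem.Str.isIn pr.1 (PySem.Str.lower it.2) then
            (st.1 ++ [(it.1, it.2, pr.2)], st.2 ++ [pr.2])
          else st)
        (ms, ([] : List String))).1 := by
  have hmain := pvMain
    ((pvCategories.filter
        (fun ck => ck.2.any (fun kw => PySem.Str.isIn kw (PySem.Str.lower ql)))).map Prod.fst)
    (fun kw => PySem.Str.isIn kw (PySem.Str.lower it.2))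
    (fun cat => (it.1, it.2, cat)) pvCategories pvCategories_names_nodup (ms, [])
    (fun _ _ => rfl)
  beta_reduce at hmain
  rw [hmain]
  refine PySem.List.foldl_congr_mem _ _ _ _ (fun m ck hmem => ?_)
  rw [pvContainsFilter pvCategories _ pvCategories_names_nodup ck hmem]
  cases h1 : ck.2.any (fun kw => PySem.Str.isIn kw (PySem.Str.lower it.2)) <;>
    cases h2 : ck.2.any (fun kw => PySem.Str.isIn kw (PySem.Str.lower ql)) <;>
      simp_all

-- ===== VERDICT (by name: the statement is the Claim_ definition above) =====
theorem search_by_category_spec : Claim_equal_search_by_category := by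
  intro query texts _
  unfold Spec_search_by_category search_by_category search_by_category_alt
  exact PySem.List.foldl_congr_mem _ _ _ _ (fun ms it _ => pvPerText query it ms)
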